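-- pv_equiv track=rewrite | github.com/JonghanJeon/Coding_Test | 프로그래머스/Lv.1/둘만의 암호.py | solution
-- ===== SOURCE A (Python) =====
-- def solution(s, skip, index):
--     li = list(s)
--     for idx, spell in enumerate(li):
--         ch_cnt = index
--         num = ord(spell) # 아스키 코드 숫자
--         x = 1 # 추가할 숫자
--         cnt = 0 # 넘어간 횟수
--         while(True):
--             if (num+x) > 122:
--                 num -= 26
--                 if chr(num+x) not in skip:
--                     x += 1
--                     ch_cnt -= 1
--                 else:
--                     x += 1
--                     cnt += 1
--             else:
--                 if chr(num+x) not in skip: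
--                     x += 1
--                     ch_cnt -= 1
--                 else:
--                     x += 1
--                     cnt += 1
--             if ch_cnt == 0:
--                 li[idx] = chr(num+cnt+index)
--                 break
--     answer = ''
--     for s in li:
--         answer += s
--     return answer.strip()
-- ===== SOURCE B (Python) =====
-- def solution(s, skip, index):
--     # Closed-form per character: the answer for a char is the index-th non-skip
--     # character reached by scanning codes upward with A's wrap rule; the scan is
--     # a finite "ramp" up to 'z' followed by a cycle over the non-skip letters,
--     # so one filtered range + one modular lookup replaces A's per-step walk.
--     valid = [c for c in range(97, 123) if chr(c) not in skip]
--     out = []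
--     for ch in s:
--         start = ord(ch) + 1
--         c0 = start if start <= 122 else start - 26
--         pre = [c for c in range(c0, 123) if chr(c) not in skip]
--         if index <= len(pre):
--             out.append(chr(pre[index - 1]))
--         else:
--             out.append(chr(valid[(index - len(pre) - 1) % len(valid)]))
--     return ''.join(out).strip()
-- ===== Notes on version B (the rewrite author's own statement) =====
-- stated objective: faster
-- what changed: A advances each character one code at a time (index non-skip steps per char); B precomputes the filtered code ranges once per char and answers with one list lookup plus a modular index into the non-skip alphabet, removing the per-step walk.
-- outside the precondition, e.g. on solution('a', 'b', 0): A returns 'b', B returns 'z'; on solution(' ', 'abcdefghijklmnopqrstuvwxyz', 1): A returns '!', B returns '!'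
import Mathlib
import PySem

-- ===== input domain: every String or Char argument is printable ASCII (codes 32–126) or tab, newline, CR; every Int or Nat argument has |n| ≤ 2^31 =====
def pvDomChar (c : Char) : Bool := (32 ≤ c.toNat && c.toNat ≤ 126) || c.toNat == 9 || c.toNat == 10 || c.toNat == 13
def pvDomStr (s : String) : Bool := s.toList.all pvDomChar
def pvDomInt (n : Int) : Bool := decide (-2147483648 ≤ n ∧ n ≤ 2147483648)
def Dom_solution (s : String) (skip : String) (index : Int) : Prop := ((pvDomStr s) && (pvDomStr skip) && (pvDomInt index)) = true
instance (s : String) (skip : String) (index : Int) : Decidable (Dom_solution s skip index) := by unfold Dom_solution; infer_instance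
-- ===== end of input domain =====

-- B replaces A's per-step character walk by one filtered range and a modular lookup (asymptotically faster in index).

-- ===== PORT A =====
-- A's while-True loop; `fuel` only totalises it (Python has no such bound): under
-- Pre_solution the loop provably breaks before the fuel runs out.
def solutionLoop (skip : String) (index : Int) (fuel : Nat) (num x cnt ch_cnt : Int) : Int :=
  match fuel with
  | 0 => 0
  | fuel + 1 =>
    if num + x > 122 then
      -- num -= 26
      if !(PySem.Str.isIn (String.mk [Char.ofNat ((num - 26) + x).toNat]) skip) then
        (if ch_cnt - 1 = 0 then (num - 26) + cnt + index
         else solutionLoop skip index fuel (num - 26) (x + 1) cnt (ch_cnt - 1))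
      else
        (if ch_cnt = 0 then (num - 26) + (cnt + 1) + index
         else solutionLoop skip index fuel (num - 26) (x + 1) (cnt + 1) ch_cnt)
    else
      if !(PySem.Str.isIn (String.mk [Char.ofNat (num + x).toNat]) skip) then
        (if ch_cnt - 1 = 0 then num + cnt + index
         else solutionLoop skip index fuel num (x + 1) cnt (ch_cnt - 1))
      else
        (if ch_cnt = 0 then num + (cnt + 1) + index
         else solutionLoop skip index fuel num (x + 1) (cnt + 1) ch_cnt)

def solution (s : String) (skip : String) (index : Int) : String :=
  let li := s.toList.map (fun spell =>
    Char.ofNat (solutionLoop skip index (130 + 27 * index.toNat) (spell.toNat : Int) 1 0 index).toNat)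
  PySem.Str.strip (String.mk li)

-- ===== PORT B =====
def solution_alt (s : String) (skip : String) (index : Int) : String :=
  let valid := (PySem.List.pyRange 97 123 1).filter
      (fun c => !(PySem.Str.isIn (String.mk [Char.ofNat c.toNat]) skip))
  let out := s.toList.map (fun ch =>
    let start : Int := (ch.toNat : Int) + 1
    let c0 : Int := if start ≤ 122 then start else start - 26
    let pre := (PySem.List.pyRange c0 123 1).filter
        (fun c => !(PySem.Str.isIn (String.mk [Char.ofNat c.toNat]) skip))
    if index ≤ (pre.length : Int) then
      Char.ofNat (PySem.List.pyGetD pre (index - 1) 0).toNat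
    else
      Char.ofNat (PySem.List.pyGetD valid
        (PySem.Int.mod (index - (pre.length : Int) - 1) (valid.length : Int)) 0).toNat)
  PySem.Str.strip (String.mk out)

-- ===== PRECONDITION & SPEC =====
-- Pre_ admits the inputs on which A's scan terminates: index ≥ 1 (for index ≤ 0 A
-- diverges on most inputs, and where it does return — first scanned char in skip —
-- the value is accidental) and some lowercase letter outside skip (else the wrapped
-- scan cycles forever); the rare terminating case where skip holds all 26 letters
-- but the pre-wrap ramp alone supplies index non-skip codes is also excluded.
-- The empty string is admitted unconditionally (A returns "" without looping).
def Pre_solution (s : String) (skip : String) (index : Int) : Prop :=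
  s = "" ∨ (1 ≤ index ∧
    ((PySem.List.pyRange 97 123 1).any
      (fun c => !(PySem.Str.isIn (String.mk [Char.ofNat c.toNat]) skip)) = true))
instance (s : String) (skip : String) (index : Int) : Decidable (Pre_solution s skip index) := by
  unfold Pre_solution; infer_instance

def pvWitness_solution : String × String × Int := ("hello z!", "ab", 7)

def Spec_solution (s : String) (skip : String) (index : Int) (out : String) : Prop := out = solution_alt s skip index
instance (s : String) (skip : String) (index : Int) (out : String) : Decidable (Spec_solution s skip index out) := by unfold Spec_solution; infer_instance

-- ===== CLAIM (what is proved, stated in full; the proofs are below) =====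
def Claim_equal_solution : Prop := ∀ (s : String) (skip : String) (index : Int), Dom_solution s skip index → Pre_solution s skip index → Spec_solution s skip index (solution s skip index)

-- ===== LEMMAS AND PROOFS =====

-- membership of a single scanned code in skip, as both ports write it
def pvMem (skip : String) (c : Int) : Bool :=
  PySem.Str.isIn (String.mk [Char.ofNat c.toNat]) skip

-- proof-side view of A's loop: from code c, return the n-th non-skip code of the
-- wrapped upward scan (none if the fuel runs out)
def seekF (skip : String) (fuel : Nat) (c : Int) (n : Nat) : Option Int :=
  match fuel with
  | 0 => none
  | fuel + 1 =>
    if pvMem skip c then seekF skip fuel (if c + 1 > 122 then c - 25 else c + 1) n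
    else if n ≤ 1 then some c
    else seekF skip fuel (if c + 1 > 122 then c - 25 else c + 1) (n - 1)

def preL (skip : String) (c : Int) : List Int :=
  (PySem.List.pyRange c 123 1).filter (fun k => !pvMem skip k)

theorem loop_eq_seek (skip : String) (index : Int) :
    ∀ (fuel : Nat) (num x cnt ch_cnt : Int), 1 ≤ ch_cnt → cnt + index = x - 1 + ch_cnt →
    solutionLoop skip index fuel num x cnt ch_cnt =
      (seekF skip fuel (if num + x > 122 then num + x - 26 else num + x) ch_cnt.toNat).getD 0 := by
  intro fuel
  induction fuel with
  | zero => intro num x cnt ch_cnt h1 h2; simp [solutionLoop, seekF]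
  | succ fuel ih =>
    intro num x cnt ch_cnt h1 h2
    simp only [solutionLoop, seekF]
    by_cases hw : num + x > 122
    · rw [if_pos hw, if_pos hw]
      set c : Int := num + x - 26 with hc
      have hm : num - 26 + x = c := by omega
      rw [hm]
      rw [show PySem.Str.isIn (String.mk [Char.ofNat c.toNat]) skip = pvMem skip c from rfl]
      by_cases hmem : pvMem skip c = true
      · rw [if_pos hmem, hmem]
        simp only [Bool.not_true, Bool.false_eq_true, if_false]
        rw [if_neg (show ¬ch_cnt = 0 by omega)]
        rw [ih (num - 26) (x + 1) (cnt + 1) ch_cnt h1 (by omega)]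
        have hx : num - 26 + (x + 1) = c + 1 := by omega
        rw [hx]
        by_cases h122 : c + 1 > 122
        · rw [if_pos h122, if_pos h122]
          have : c + 1 - 26 = c - 25 := by omega
          rw [this]
        · rw [if_neg h122, if_neg h122]
      · rw [if_neg hmem]
        rw [Bool.not_eq_true] at hmem
        rw [hmem]
        simp only [Bool.not_false, if_true]
        by_cases hend : ch_cnt = 1
        · rw [if_pos (show ch_cnt - 1 = 0 by omega), if_pos (show ch_cnt.toNat ≤ 1 by omega)]
          simp only [Option.getD_some]
          omega
        · rw [if_neg (show ¬ch_cnt - 1 = 0 by omega), if_neg (show ¬ch_cnt.toNat ≤ 1 by omega)]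
          rw [ih (num - 26) (x + 1) cnt (ch_cnt - 1) (by omega) (by omega)]
          have hx : num - 26 + (x + 1) = c + 1 := by omega
          rw [hx]
          have hct : (ch_cnt - 1).toNat = ch_cnt.toNat - 1 := by omega
          rw [hct]
          by_cases h122 : c + 1 > 122
          · rw [if_pos h122, if_pos h122]
            have : c + 1 - 26 = c - 25 := by omega
            rw [this]
          · rw [if_neg h122, if_neg h122]
    · rw [if_neg hw, if_neg hw]
      set c : Int := num + x with hc
      rw [show PySem.Str.isIn (String.mk [Char.ofNat c.toNat]) skip = pvMem skip c from rfl]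
      by_cases hmem : pvMem skip c = true
      · rw [if_pos hmem, hmem]
        simp only [Bool.not_true, Bool.false_eq_true, if_false]
        rw [if_neg (show ¬ch_cnt = 0 by omega)]
        rw [ih num (x + 1) (cnt + 1) ch_cnt h1 (by omega)]
        have hx : num + (x + 1) = c + 1 := by omega
        rw [hx]
        by_cases h122 : c + 1 > 122
        · rw [if_pos h122, if_pos h122]
          have : c + 1 - 26 = c - 25 := by omega
          rw [this]
        · rw [if_neg h122, if_neg h122]
      · rw [if_neg hmem]
        rw [Bool.not_eq_true] at hmem
        rw [hmem]
        simp only [Bool.not_false, if_true]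
        by_cases hend : ch_cnt = 1
        · rw [if_pos (show ch_cnt - 1 = 0 by omega), if_pos (show ch_cnt.toNat ≤ 1 by omega)]
          simp only [Option.getD_some]
          omega
        · rw [if_neg (show ¬ch_cnt - 1 = 0 by omega), if_neg (show ¬ch_cnt.toNat ≤ 1 by omega)]
          rw [ih num (x + 1) cnt (ch_cnt - 1) (by omega) (by omega)]
          have hx : num + (x + 1) = c + 1 := by omega
          rw [hx]
          have hct : (ch_cnt - 1).toNat = ch_cnt.toNat - 1 := by omega
          rw [hct]
          by_cases h122 : c + 1 > 122
          · rw [if_pos h122, if_pos h122]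
            have : c + 1 - 26 = c - 25 := by omega
            rw [this]
          · rw [if_neg h122, if_neg h122]

theorem ramp (skip : String) :
    ∀ (d : Nat) (c : Int), c ≤ 122 → (123 - c).toNat = d → ∀ (n : Nat), 1 ≤ n → ∀ (f : Nat),
    seekF skip (d + f) c n =
      (if n ≤ (preL skip c).length then some ((preL skip c).getD (n - 1) 0)
       else seekF skip f 97 (n - (preL skip c).length)) := by
  intro d
  induction d with
  | zero => intro c hc hd; omega
  | succ d ih =>
    intro c hc hd n hn f
    have hlt : c < 123 := by omega
    have hcons : PySem.List.pyRange c 123 1 = c :: PySem.List.pyRange (c + 1) 123 1 :=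
      PySem.List.pyRange_one_cons hlt
    have hpre : preL skip c =
        (if pvMem skip c then preL skip (c + 1) else c :: preL skip (c + 1)) := by
      simp only [preL, hcons, List.filter_cons]
      by_cases hm : pvMem skip c <;> simp [hm]
    have hstep : (Nat.succ d) + f = Nat.succ (d + f) := by omega
    rw [hstep]
    by_cases hm : pvMem skip c
    · rw [hpre, if_pos hm]
      simp only [seekF, if_pos hm]
      by_cases hc122 : c = 122
      · have h97 : (if c + 1 > 122 then c - 25 else c + 1) = 97 := by
          rw [if_pos (by omega)]; omega
        rw [h97]
        have hd0 : d = 0 := by omega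
        have hnil : preL skip (c + 1) = [] := by
          simp [preL, PySem.List.pyRange_one_eq_nil (by omega : (123:Int) ≤ c + 1)]
        rw [hnil]
        simp only [List.length_nil, Nat.sub_zero]
        rw [if_neg (by omega : ¬ n ≤ 0)]
        rw [hd0, Nat.zero_add]
      · have hnext : (if c + 1 > 122 then c - 25 else c + 1) = c + 1 := by
          rw [if_neg (by omega)]
        rw [hnext]
        exact ih (c + 1) (by omega) (by omega) n hn f
    · rw [hpre, if_neg hm]
      simp only [seekF, if_neg hm]
      by_cases hn1 : n = 1
      · subst hn1
        rw [if_pos (by omega : 1 ≤ 1)]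
        rw [if_pos (by simp : 1 ≤ (c :: preL skip (c + 1)).length)]
        simp
      · rw [if_neg (by omega : ¬ n ≤ 1)]
        by_cases hc122 : c = 122
        · have h97 : (if c + 1 > 122 then c - 25 else c + 1) = 97 := by
            rw [if_pos (by omega)]; omega
          rw [h97]
          have hd0 : d = 0 := by omega
          have hnil : preL skip (c + 1) = [] := by
            simp [preL, PySem.List.pyRange_one_eq_nil (by omega : (123:Int) ≤ c + 1)]
          rw [hnil]
          simp only [List.length_cons, List.length_nil]
          rw [if_neg (by omega : ¬ n ≤ 0 + 1)]
          rw [hd0, Nat.zero_add]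
        · have hnext : (if c + 1 > 122 then c - 25 else c + 1) = c + 1 := by
            rw [if_neg (by omega)]
          rw [hnext]
          rw [ih (c + 1) (by omega) (by omega) (n - 1) (by omega) f]
          simp only [List.length_cons]
          by_cases hlen : n ≤ (preL skip (c + 1)).length + 1
          · rw [if_pos hlen, if_pos (by omega : n - 1 ≤ (preL skip (c + 1)).length)]
            have : (c :: preL skip (c + 1)).getD (n - 1) 0 = (preL skip (c + 1)).getD (n - 1 - 1) 0 := by
              rcases Nat.exists_eq_add_of_le (by omega : 1 ≤ n - 1) with ⟨k, hk⟩
              rw [hk]; simp [Nat.add_comm]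
            rw [this]
          · rw [if_neg hlen, if_neg (by omega : ¬ n - 1 ≤ (preL skip (c + 1)).length)]
            congr 1; omega

theorem cyc (skip : String) (hvalid : preL skip 97 ≠ []) :
    ∀ (n : Nat), 1 ≤ n → ∀ (f : Nat),
    seekF skip (26 * n + f) 97 n =
      some ((preL skip 97).getD ((n - 1) % (preL skip 97).length) 0) := by
  intro n
  induction n using Nat.strong_induction_on with
  | _ n ih =>
    intro hn f
    have hL : 1 ≤ (preL skip 97).length := by
      rcases List.exists_mem_of_ne_nil _ hvalid with ⟨a, ha⟩
      exact List.length_pos_of_mem ha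
    have hfuel : 26 * n + f = 26 + (26 * (n - 1) + f) := by omega
    rw [hfuel]
    rw [ramp skip 26 97 (by omega) (by decide) n hn (26 * (n - 1) + f)]
    by_cases hle : n ≤ (preL skip 97).length
    · rw [if_pos hle]
      congr 2
      exact (Nat.mod_eq_of_lt (by omega)).symm
    · rw [if_neg hle]
      set L := (preL skip 97).length with hLdef
      have hfuel2 : 26 * (n - 1) + f = 26 * (n - L) + (26 * (L - 1) + f) := by
        have : n - 1 = (n - L) + (L - 1) := by omega
        rw [this]; ring
      rw [hfuel2]
      rw [ih (n - L) (by omega) (by omega) (26 * (L - 1) + f)]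
      congr 2
      have : n - 1 = (n - L - 1) + L := by omega
      rw [this, Nat.add_mod_right]

-- per-character equality: A's scanned answer code equals B's closed form
theorem char_eq (skip : String) (index : Int) (o : Int)
    (ho1 : 9 ≤ o) (ho2 : o ≤ 126) (hidx : 1 ≤ index)
    (hvalid : preL skip 97 ≠ []) :
    (solutionLoop skip index (130 + 27 * index.toNat) o 1 0 index) =
      (if index ≤ ((preL skip (if o + 1 ≤ 122 then o + 1 else o + 1 - 26)).length : Int) then
        PySem.List.pyGetD (preL skip (if o + 1 ≤ 122 then o + 1 else o + 1 - 26)) (index - 1) 0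
       else
        PySem.List.pyGetD (preL skip 97)
          (PySem.Int.mod (index - ((preL skip (if o + 1 ≤ 122 then o + 1 else o + 1 - 26)).length : Int) - 1)
            ((preL skip 97).length : Int)) 0) := by
  set c0 : Int := if o + 1 ≤ 122 then o + 1 else o + 1 - 26 with hc0def
  have hc0a : 10 ≤ c0 := by simp only [hc0def]; split <;> omega
  have hc0b : c0 ≤ 122 := by simp only [hc0def]; split <;> omega
  have hwrap : (if o + 1 > 122 then o + 1 - 26 else o + 1) = c0 := by
    simp only [hc0def]; split <;> split <;> omega
  set n : Nat := index.toNat with hndef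
  have hn1 : 1 ≤ n := by omega
  have hni : (n : Int) = index := by omega
  have hL : 1 ≤ (preL skip 97).length := by
    rcases List.exists_mem_of_ne_nil _ hvalid with ⟨a, ha⟩
    exact List.length_pos_of_mem ha
  rw [loop_eq_seek skip index (130 + 27 * index.toNat) o 1 0 index hidx (by omega)]
  rw [hwrap]
  have hramp : (123 - c0).toNat ≤ 113 := by omega
  have hfuel : 130 + 27 * index.toNat = (123 - c0).toNat + (130 + 27 * n - (123 - c0).toNat) := by
    omega
  rw [hfuel, ramp skip (123 - c0).toNat c0 hc0b rfl n hn1 _]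
  set P := preL skip c0 with hPdef
  by_cases hle : n ≤ P.length
  · rw [if_pos hle, if_pos (by omega : index ≤ (P.length : Int))]
    simp only [Option.getD_some]
    rw [PySem.List.pyGetD_of_nonneg _ _ (by omega : (0:Int) ≤ index - 1)]
    congr 1
    omega
  · rw [if_neg hle, if_neg (by omega : ¬ index ≤ (P.length : Int))]
    set m : Nat := n - P.length with hmdef
    have hm1 : 1 ≤ m := by omega
    have hfuel2 : 130 + 27 * n - (123 - c0).toNat = 26 * m + (130 + 27 * n - (123 - c0).toNat - 26 * m) := by
      have : 26 * m ≤ 26 * n := by omega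
      omega
    rw [hfuel2, cyc skip hvalid m hm1 _]
    simp only [Option.getD_some]
    have hmod : PySem.Int.mod (index - (P.length : Int) - 1) ((preL skip 97).length : Int) =
        (((m - 1) % (preL skip 97).length : Nat) : Int) := by
      have h1 : index - (P.length : Int) - 1 = ((m - 1 : Nat) : Int) := by omega
      rw [h1]
      exact PySem.Int.mod_natCast (m - 1) (preL skip 97).length
    rw [hmod, PySem.List.pyGetD_of_nonneg _ _ (by positivity)]
    congr 1

-- ===== VERDICT (by name: the statement is the Claim_ definition above) =====
theorem solution_spec : Claim_equal_solution := by
  intro s skip index hdom hpre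
  show solution s skip index = solution_alt s skip index
  rcases hpre with hs | ⟨hidx, hany⟩
  · subst hs
    rfl
  · have hvalid : preL skip 97 ≠ [] := by
      rw [List.any_eq_true] at hany
      obtain ⟨c, hc, hpc⟩ := hany
      intro hnil
      have hcmem : c ∈ preL skip 97 := by
        apply List.mem_filter.mpr
        refine ⟨hc, ?_⟩
        simpa [pvMem] using hpc
      rw [hnil] at hcmem
      exact absurd hcmem List.not_mem_nil
    have hchars : ∀ ch ∈ s.toList, 9 ≤ ((ch.toNat : Int)) ∧ (ch.toNat : Int) ≤ 126 := by
      intro ch hch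
      have hd : pvDomStr s = true := by
        unfold Dom_solution at hdom
        simp only [Bool.and_eq_true] at hdom
        exact hdom.1.1
      unfold pvDomStr at hd
      rw [List.all_eq_true] at hd
      have := hd ch hch
      unfold pvDomChar at this
      simp only [Bool.or_eq_true, Bool.and_eq_true, decide_eq_true_eq, beq_iff_eq] at this
      omega
    unfold solution solution_alt
    simp only []
    congr 1
    congr 1
    apply List.map_congr_left
    intro ch hch
    obtain ⟨h9, h126⟩ := hchars ch hch
    have hchar := char_eq skip index (ch.toNat : Int) h9 h126 hidx hvalid
    simp only [preL, pvMem] at hchar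
    rw [hchar]
    rw [apply_ite (fun z : Int => Char.ofNat z.toNat)]
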